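-- pv_equiv track=rewrite | github.com/sharkymarky/slicer | src/scope_date_type/pipeline.py | _count_punct_and_space
-- ===== SOURCE A (Python) =====
-- import string
--
-- def _count_punct_and_space(s: str) -> tuple[int, int]:
--     punct = 0
--     spaces = 0
--     for ch in s:
--         if ch.isspace():
--             spaces += 1
--         elif ch in string.punctuation:
--             punct += 1
--     return punct, spaces
-- ===== SOURCE B (Python) =====
-- import string
-- from collections import Counter
--
--
-- def _count_punct_and_space(s: str) -> tuple[int, int]:
--     counts = Counter(s)
--     punct = sum(n for ch, n in counts.items() if ch in string.punctuation)
--     spaces = sum(n for ch, n in counts.items() if ch.isspace())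
--     return punct, spaces
-- ===== Notes on version B (the rewrite author's own statement) =====
-- stated objective: idiomatic
-- what changed: B builds a Counter frequency table once and sums multiplicities over the distinct characters (two comprehensions over the table) instead of A's single sequential scan with two mutable accumulators and an if/elif chain.
import Mathlib
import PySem

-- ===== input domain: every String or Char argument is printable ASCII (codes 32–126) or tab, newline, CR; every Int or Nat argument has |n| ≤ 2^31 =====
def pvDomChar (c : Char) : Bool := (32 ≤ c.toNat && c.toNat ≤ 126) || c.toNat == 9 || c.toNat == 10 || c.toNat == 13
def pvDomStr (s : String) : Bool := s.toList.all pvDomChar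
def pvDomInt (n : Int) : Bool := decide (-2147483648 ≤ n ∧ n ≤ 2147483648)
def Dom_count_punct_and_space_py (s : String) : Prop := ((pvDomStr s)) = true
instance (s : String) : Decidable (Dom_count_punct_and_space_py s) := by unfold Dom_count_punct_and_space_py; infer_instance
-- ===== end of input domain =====

-- B replaces A's sequential two-accumulator scan by a Counter frequency table summed over distinct characters; objective: idiomatic.

-- ===== PORT A =====
-- string.punctuation, as a list of its characters
def pvPunct : List Char :=
  ['!', '"', '#', '$', '%', '&', '\'', '(', ')', '*', '+', ',', '-', '.', '/',
   ':', ';', '<', '=', '>', '?', '@', '[', '\\', ']', '^', '_', '`', '{', '|', '}', '~']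

-- 'ch in string.punctuation' is a one-character substring test, i.e. exactly list membership
def count_punct_and_space_py (s : String) : Int × Int :=
  s.toList.foldl
    (fun st ch =>
      if PySem.Chars.isspace ch then (st.1, st.2 + 1)
      else if pvPunct.contains ch then (st.1 + 1, st.2)
      else st)
    (0, 0)

-- ===== PORT B =====
def count_punct_and_space_py_alt (s : String) : Int × Int :=
  let counts := PySem.Dict.counter s.toList
  let punct := counts.items.foldl (fun acc kn => if pvPunct.contains kn.1 then acc + kn.2 else acc) 0
  let spaces := counts.items.foldl (fun acc kn => if PySem.Chars.isspace kn.1 then acc + kn.2 else acc) 0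
  (punct, spaces)

-- ===== PRECONDITION & SPEC =====
def Spec_count_punct_and_space_py (s : String) (out : Int × Int) : Prop := out = count_punct_and_space_py_alt s
instance (s : String) (out : Int × Int) : Decidable (Spec_count_punct_and_space_py s out) := by unfold Spec_count_punct_and_space_py; infer_instance

-- ===== CLAIM (what is proved, stated in full; the proofs are below) =====
def Claim_equal_count_punct_and_space_py : Prop := ∀ (s : String), Dom_count_punct_and_space_py s → Spec_count_punct_and_space_py s (count_punct_and_space_py s)

-- ===== LEMMAS AND PROOFS =====

-- A's fold, with general accumulator, computes two countP's.
theorem pvA_fold (xs : List Char) (p sp : Int) :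
    xs.foldl
      (fun st ch =>
        if PySem.Chars.isspace ch then (st.1, st.2 + 1)
        else if pvPunct.contains ch then (st.1 + 1, st.2)
        else st)
      (p, sp)
      = (p + (xs.countP (fun c => !PySem.Chars.isspace c && pvPunct.contains c) : Int),
         sp + (xs.countP (fun c => PySem.Chars.isspace c) : Int)) := by
  induction xs generalizing p sp with
  | nil => simp
  | cons x xs ih =>
    rw [List.foldl_cons, List.countP_cons, List.countP_cons]
    by_cases hs : PySem.Chars.isspace x = true
    · rw [if_pos hs, ih]
      simp only [hs, Bool.not_true, Bool.false_and, if_true, Prod.mk.injEq]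
      push_cast
      constructor <;> ring
    · by_cases hp : pvPunct.contains x = true
      · rw [if_neg hs, if_pos hp, ih]
        simp only [hs, hp, Bool.not_false, Bool.true_and, if_true, Prod.mk.injEq]
        push_cast
        constructor <;> ring
      · rw [if_neg hs, if_neg hp, ih]
        simp only [hs, hp, Bool.not_false, Bool.true_and, Prod.mk.injEq]
        push_cast
        constructor <;> ring

-- a foldl that conditionally adds is an accumulator plus a sum
theorem pvFoldl_if_add (pred : Char → Bool) (f : Char → Int) (ks : List Char) (a : Int) :
    ks.foldl (fun acc k => if pred k then acc + f k else acc) a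
      = a + (ks.map (fun k => if pred k then f k else 0)).sum := by
  induction ks generalizing a with
  | nil => simp
  | cons k ks ih =>
    simp only [List.foldl_cons, List.map_cons, List.sum_cons]
    rw [ih]
    split_ifs <;> ring

theorem pvSum_count_cons (pred : Char → Bool) (x : Char) (xs ks : List Char)
    (hnd : ks.Nodup) (hx : x ∈ ks) :
    (ks.map (fun k => if pred k then ((x :: xs).count k : Int) else 0)).sum
      = (ks.map (fun k => if pred k then (xs.count k : Int) else 0)).sum
        + (if pred x then 1 else 0) := by
  induction ks with
  | nil => cases hx
  | cons k ks ih =>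
    simp only [List.map_cons, List.sum_cons]
    rcases List.nodup_cons.mp hnd with ⟨hnot, hnd'⟩
    by_cases hkx : k = x
    · subst hkx
      have htail : (ks.map (fun k' => if pred k' then (((k :: xs).count k' : Int)) else 0))
          = ks.map (fun k' => if pred k' then ((xs.count k' : Int)) else 0) := by
        refine List.map_congr_left ?_
        intro k' hk'
        have hne : k' ≠ k := fun h => hnot (h ▸ hk')
        rw [List.count_cons]
        simp [Ne.symm hne]
      rw [htail, List.count_cons_self]
      push_cast
      split_ifs <;> ring
    · have hx' : x ∈ ks := by
        rcases hx with _ | h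
        · exact absurd rfl hkx
        · assumption
      rw [ih hnd' hx']
      have hhead : ((x :: xs).count k : Int) = (xs.count k : Int) := by
        have hne : ¬ (x = k) := fun h => hkx h.symm
        rw [List.count_cons]
        simp [hne]
      rw [hhead]
      ring

-- summing multiplicities over a nodup superset of keys is countP
theorem pvSum_count (pred : Char → Bool) (ks : List Char) (hnd : ks.Nodup) :
    ∀ xs : List Char, (∀ x ∈ xs, x ∈ ks) →
      (ks.map (fun k => if pred k then (xs.count k : Int) else 0)).sum
        = (xs.countP pred : Int) := by
  intro xs
  induction xs with
  | nil => intro _; simp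
  | cons x xs ih =>
    intro hmem
    rw [pvSum_count_cons pred x xs ks hnd (hmem x (List.mem_cons_self ..)),
        ih (fun y hy => hmem y (List.mem_cons_of_mem _ hy)), List.countP_cons]
    push_cast
    split_ifs <;> ring

-- no punctuation character is whitespace
theorem pvPunct_not_space (c : Char) (h : pvPunct.contains c = true) :
    PySem.Chars.isspace c = false := by
  have hc : c ∈ pvPunct := by simpa using h
  fin_cases hc <;> rfl

theorem pvB_sum (pred : Char → Bool) (xs : List Char) :
    (PySem.Dict.counter xs).items.foldl
        (fun acc kn => if pred kn.1 then acc + kn.2 else acc) 0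
      = (xs.countP pred : Int) := by
  rw [PySem.Dict.items_counter, List.foldl_map, pvFoldl_if_add pred (fun k => (xs.count k : Int))]
  simp only [zero_add]
  exact pvSum_count pred _ (PySem.Set.nodup_ofList xs)
    xs (fun x hx => (PySem.Set.mem_ofList xs x).mpr hx)

-- ===== VERDICT (by name: the statement is the Claim_ definition above) =====
theorem count_punct_and_space_py_spec : Claim_equal_count_punct_and_space_py := by
  intro s _
  have halt : count_punct_and_space_py_alt s
      = ((PySem.Dict.counter s.toList).items.foldl
           (fun acc kn => if pvPunct.contains kn.1 then acc + kn.2 else acc) 0,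
         (PySem.Dict.counter s.toList).items.foldl
           (fun acc kn => if PySem.Chars.isspace kn.1 then acc + kn.2 else acc) 0) := rfl
  unfold Spec_count_punct_and_space_py count_punct_and_space_py
  have hpred : (fun c => !PySem.Chars.isspace c && pvPunct.contains c) = fun c => pvPunct.contains c := by
    funext c
    by_cases h : pvPunct.contains c = true
    · rw [h, pvPunct_not_space c h]; rfl
    · rw [Bool.not_eq_true] at h; rw [h, Bool.and_false]
  rw [halt, pvA_fold, pvB_sum, pvB_sum, hpred]
  simp only [zero_add]
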